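-- pv_equiv track=rewrite | github.com/DDing-Ding/Algorithm | chowon/0128/외톨이 알파벳.py | solution
-- ===== SOURCE A (Python) =====
-- def solution(input_string):
--     answer = ''
--
--     for p in range(0,len(input_string)):
--         if input_string[p] in answer: continue
--         for q in range(p+1,len(input_string)):
--             if input_string[p] == input_string[q]:
--                 if ((q-p) == 1): break
--                 elif ((q-p) > 1):
--                     answer += input_string[p]
--                     break
--
--     if len(answer) == 0 : return 'N'
--     else: return ''.join(sorted(answer))
-- ===== SOURCE B (Python) =====
-- def solution(input_string):
--     seen = set()
--     lonely = set()
--     prev = None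
--     for ch in input_string:
--         if ch != prev and ch in seen:
--             lonely.add(ch)
--         seen.add(ch)
--         prev = ch
--     return ''.join(sorted(lonely)) if lonely else 'N'
-- ===== Notes on version B (the rewrite author's own statement) =====
-- stated objective: alternative
-- what changed: Replaces A's per-position forward scan for the next equal character (nested loops with break) with a single left-to-right pass that keeps the set of characters seen so far and the previous character, flagging a character when it reappears not immediately after its previous occurrence.
import Mathlib
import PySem

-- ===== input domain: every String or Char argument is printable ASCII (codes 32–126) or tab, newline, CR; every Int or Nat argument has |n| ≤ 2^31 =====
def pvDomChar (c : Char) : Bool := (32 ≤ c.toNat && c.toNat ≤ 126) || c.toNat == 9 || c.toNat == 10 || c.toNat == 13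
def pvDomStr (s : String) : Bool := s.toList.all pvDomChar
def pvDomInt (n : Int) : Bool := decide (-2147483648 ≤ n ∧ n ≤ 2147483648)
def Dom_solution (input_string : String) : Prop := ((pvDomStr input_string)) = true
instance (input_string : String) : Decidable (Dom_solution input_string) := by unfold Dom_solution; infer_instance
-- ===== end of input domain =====

-- B replaces A's nested scan-ahead per position with one pass tracking the set of
-- seen characters and the previous character (objective: alternative algorithm).

-- ===== PORT A =====
-- inner loop: for q in range(p+1, len): first occurrence of c decides (break)
def solInner (s : List Char) (c : Char) (q : Nat) (p : Nat) : Bool :=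
  if h : q < s.length then
    if s[q] = c then
      if q - p = 1 then false
      else if q - p > 1 then true
      else solInner s c (q + 1) p
    else solInner s c (q + 1) p
  else false
termination_by s.length - q

-- outer loop: for p in range(0, len), accumulating answer
def solOuter (s : List Char) (p : Nat) (answer : List Char) : List Char :=
  if h : p < s.length then
    if s[p] ∈ answer then solOuter s (p + 1) answer
    else if solInner s s[p] (p + 1) p then solOuter s (p + 1) (answer ++ [s[p]])
    else solOuter s (p + 1) answer
  else answer
termination_by s.length - p

def solution (input_string : String) : String :=
  let answer := solOuter input_string.toList 0 []
  if answer.length = 0 then "N"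
  else String.ofList (PySem.List.sorted answer (fun x => x) false)

-- ===== PORT B =====
-- one pass: flag ch when it differs from the previous char but was already seen
def altLoop (seen : PySem.Set Char) (lonely : PySem.Set Char) (prev : Option Char) :
    List Char → PySem.Set Char
  | [] => lonely
  | ch :: rest =>
    let lonely' := if some ch ≠ prev ∧ PySem.Set.contains seen ch then PySem.Set.add lonely ch
                   else lonely
    altLoop (PySem.Set.add seen ch) lonely' (some ch) rest

def solution_alt (input_string : String) : String :=
  let lonely := altLoop PySem.Set.empty PySem.Set.empty none input_string.toList
  if lonely ≠ [] then String.ofList (PySem.List.sorted lonely (fun x => x) false) else "N"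

-- ===== PRECONDITION & SPEC =====
def Spec_solution (input_string : String) (out : String) : Prop := out = solution_alt input_string
instance (input_string : String) (out : String) : Decidable (Spec_solution input_string out) := by unfold Spec_solution; infer_instance

-- ===== CLAIM (what is proved, stated in full; the proofs are below) =====
def Claim_equal_solution : Prop := ∀ (input_string : String), Dom_solution input_string → Spec_solution input_string (solution input_string)

-- ===== LEMMAS AND PROOFS =====

-- c is "lonely" in s: some occurrence at i is not preceded immediately by c, yet c occurred earlier
def Bad (s : List Char) (c : Char) : Prop :=
  ∃ i : Nat, 0 < i ∧ s[i]? = some c ∧ s[i-1]? ≠ some c ∧ c ∈ s.take i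

lemma bad_append_singleton (t : List Char) (ch c : Char) :
    Bad (t ++ [ch]) c ↔ Bad t c ∨ (c = ch ∧ t.getLast? ≠ some ch ∧ ch ∈ t) := by
  constructor
  · rintro ⟨i, hi, hgi, hpi, hmem⟩
    rcases lt_trichotomy i t.length with h | h | h
    · left
      refine ⟨i, hi, ?_, ?_, ?_⟩
      · rwa [List.getElem?_append_left h] at hgi
      · rwa [List.getElem?_append_left (by omega)] at hpi
      · rwa [List.take_append_of_le_length (by omega)] at hmem
    · right
      subst h
      have hc : c = ch := by simp at hgi; exact hgi.symm
      subst hc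
      rw [List.getElem?_append_left (by omega)] at hpi
      rw [List.take_append_of_le_length (le_refl _), List.take_length] at hmem
      exact ⟨rfl, by rwa [List.getLast?_eq_getElem?], hmem⟩
    · exfalso
      have hnone : (t ++ [ch])[i]? = none := by
        apply List.getElem?_eq_none
        simp; omega
      rw [hnone] at hgi; exact Option.some_ne_none c hgi.symm
  · rintro (⟨i, hi, hgi, hpi, hmem⟩ | ⟨hc, hlast, hmem⟩)
    · have hilen : i < t.length := (List.getElem?_eq_some_iff.mp hgi).1
      refine ⟨i, hi, ?_, ?_, ?_⟩
      · rwa [List.getElem?_append_left hilen]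
      · rwa [List.getElem?_append_left (by omega)]
      · rwa [List.take_append_of_le_length (by omega)]
    · subst hc
      have htne : t ≠ [] := by rintro rfl; simp at hmem
      have hlen : 0 < t.length := List.length_pos_iff.mpr htne
      refine ⟨t.length, hlen, ?_, ?_, ?_⟩
      · simp
      · rw [List.getElem?_append_left (by omega)]
        rwa [List.getLast?_eq_getElem?] at hlast
      · rw [List.take_append_of_le_length (le_refl _), List.take_length]
        exact hmem

lemma nodup_set_add (s : PySem.Set Char) (x : Char) (h : List.Nodup s) :
    List.Nodup (PySem.Set.add s x) := by
  unfold PySem.Set.add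
  split_ifs with hc
  · exact h
  · refine List.nodup_append.mpr ⟨h, List.nodup_singleton x, ?_⟩
    intro a ha b hb
    simp only [List.mem_singleton] at hb; subst hb
    intro hax; subst hax
    exact absurd ((PySem.Set.contains_iff s a).mpr ha) (by simpa using hc)

lemma ofList_append_singleton (t : List Char) (ch : Char) :
    PySem.Set.ofList (t ++ [ch]) = PySem.Set.add (PySem.Set.ofList t) ch := by
  rw [PySem.Set.ofList_eq_foldl, PySem.Set.ofList_eq_foldl, List.foldl_append]
  rfl

lemma altLoop_spec : ∀ (rest t lonely : List Char), List.Nodup lonely →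
    (∀ c, c ∈ lonely ↔ Bad t c) →
    List.Nodup (altLoop (PySem.Set.ofList t) lonely t.getLast? rest) ∧
    (∀ c, c ∈ altLoop (PySem.Set.ofList t) lonely t.getLast? rest ↔ Bad (t ++ rest) c) := by
  intro rest
  induction rest with
  | nil =>
    intro t lonely h1 h2
    refine ⟨h1, ?_⟩
    intro c
    rw [List.append_nil]
    exact h2 c
  | cons ch rest ih =>
    intro t lonely h1 h2
    simp only [altLoop]
    by_cases hcond : some ch ≠ t.getLast? ∧ PySem.Set.contains (PySem.Set.ofList t) ch = true
    · have h1' : List.Nodup (PySem.Set.add lonely ch) := nodup_set_add lonely ch h1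
      have h2' : ∀ c, c ∈ PySem.Set.add lonely ch ↔ Bad (t ++ [ch]) c := by
        intro c
        rw [PySem.Set.mem_add, bad_append_singleton, h2]
        constructor
        · rintro (hb | rfl)
          · exact Or.inl hb
          · exact Or.inr ⟨rfl, Ne.symm hcond.1, by
              have := hcond.2
              rwa [PySem.Set.contains_iff, PySem.Set.mem_ofList] at this⟩
        · rintro (hb | ⟨rfl, _, _⟩)
          · exact Or.inl hb
          · exact Or.inr rfl
      have := ih (t ++ [ch]) (PySem.Set.add lonely ch) h1' h2'
      rw [ofList_append_singleton, show (t ++ [ch]).getLast? = some ch by simp] at this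
      rw [if_pos hcond]
      constructor
      · exact this.1
      · intro c; rw [this.2 c]
        simp [List.append_assoc]
    · have h2' : ∀ c, c ∈ lonely ↔ Bad (t ++ [ch]) c := by
        intro c
        rw [bad_append_singleton, h2]
        constructor
        · exact Or.inl
        · rintro (hb | ⟨rfl, hne, hmem⟩)
          · exact hb
          · exfalso
            apply hcond
            refine ⟨Ne.symm hne, ?_⟩
            rw [PySem.Set.contains_iff, PySem.Set.mem_ofList]
            exact hmem
      have := ih (t ++ [ch]) lonely h1 h2'
      rw [ofList_append_singleton, show (t ++ [ch]).getLast? = some ch by simp] at this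
      rw [if_neg hcond]
      constructor
      · exact this.1
      · intro c; rw [this.2 c]
        simp [List.append_assoc]

-- ===== A side: inner loop characterisation =====
lemma solInner_iff (s : List Char) (c : Char) (q p : Nat) (hpq : p < q) :
    solInner s c q p = true ↔
      ∃ r : Nat, q ≤ r ∧ s[r]? = some c ∧ r - p > 1 ∧
        ∀ t : Nat, q ≤ t → t < r → s[t]? ≠ some c := by
  fun_induction solInner s c q p with
  | case1 q h heq h1 =>
    -- s[q] = c, q - p = 1 : returns false
    simp only [Bool.false_eq_true, false_iff]
    rintro ⟨r, hqr, hrc, hrp, hno⟩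
    rcases eq_or_lt_of_le hqr with rfl | hlt
    · omega
    · exact hno q (le_refl q) hlt (by rw [List.getElem?_eq_getElem h, heq])
  | case2 q h heq h1 h2 =>
    simp only [true_iff]
    exact ⟨q, le_refl q, by rw [List.getElem?_eq_getElem h, heq], by omega, by omega⟩
  | case3 q h heq h1 h2 ih =>
    omega
  | case4 q h heq ih =>
    rw [ih (by omega)]
    constructor
    · rintro ⟨r, hqr, hrc, hrp, hno⟩
      refine ⟨r, by omega, hrc, hrp, ?_⟩
      intro t hqt htr
      rcases eq_or_lt_of_le hqt with rfl | hlt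
      · rw [List.getElem?_eq_getElem h]
        intro hce; exact heq (Option.some_injective _ hce)
      · exact hno t hlt htr
    · rintro ⟨r, hqr, hrc, hrp, hno⟩
      have hrq : r ≠ q := by
        rintro rfl
        rw [List.getElem?_eq_getElem h] at hrc
        exact heq (Option.some_injective _ hrc)
      exact ⟨r, by omega, hrc, hrp, fun t ht htr => hno t (by omega) htr⟩
  | case5 q h =>
    simp only [Bool.false_eq_true, false_iff]
    rintro ⟨r, hqr, hrc, _, _⟩
    have : s[r]? = none := List.getElem?_eq_none (by omega)
    rw [this] at hrc
    exact Option.some_ne_none c hrc.symm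

-- ===== A side: outer loop characterisation =====
lemma solOuter_spec (s : List Char) : ∀ (p : Nat) (answer : List Char), List.Nodup answer →
    List.Nodup (solOuter s p answer) ∧
    ∀ c, c ∈ solOuter s p answer ↔
      c ∈ answer ∨ ∃ p' : Nat, p ≤ p' ∧ s[p']? = some c ∧ solInner s c (p' + 1) p' = true := by
  intro p answer hnd
  fun_induction solOuter s p answer with
  | case1 p answer h hmem ih =>
    obtain ⟨ihn, ihm⟩ := ih hnd
    refine ⟨ihn, fun c => ?_⟩
    rw [ihm c]
    constructor
    · rintro (hc | ⟨p', hp', hgc, hi⟩)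
      · exact Or.inl hc
      · exact Or.inr ⟨p', by omega, hgc, hi⟩
    · rintro (hc | ⟨p', hp', hgc, hi⟩)
      · exact Or.inl hc
      · rcases eq_or_lt_of_le hp' with rfl | hlt
        · rw [List.getElem?_eq_getElem h] at hgc
          exact Or.inl (by rwa [← Option.some_injective _ hgc])
        · exact Or.inr ⟨p', by omega, hgc, hi⟩
  | case2 p answer h hmem hin ih =>
    have hnd' : List.Nodup (answer ++ [s[p]]) := by
      refine List.nodup_append.mpr ⟨hnd, List.nodup_singleton _, ?_⟩
      intro a ha b hb
      simp only [List.mem_singleton] at hb; subst hb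
      rintro rfl; exact hmem ha
    obtain ⟨ihn, ihm⟩ := ih hnd'
    refine ⟨ihn, fun c => ?_⟩
    rw [ihm c]
    constructor
    · rintro (hc | ⟨p', hp', hgc, hi⟩)
      · rcases List.mem_append.mp hc with hc | hc
        · exact Or.inl hc
        · simp only [List.mem_singleton] at hc; subst hc
          exact Or.inr ⟨p, le_refl p, List.getElem?_eq_getElem h, hin⟩
      · exact Or.inr ⟨p', by omega, hgc, hi⟩
    · rintro (hc | ⟨p', hp', hgc, hi⟩)
      · exact Or.inl (List.mem_append.mpr (Or.inl hc))
      · rcases eq_or_lt_of_le hp' with rfl | hlt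
        · rw [List.getElem?_eq_getElem h] at hgc
          exact Or.inl (List.mem_append.mpr (Or.inr (by simp [← Option.some_injective _ hgc])))
        · exact Or.inr ⟨p', by omega, hgc, hi⟩
  | case3 p answer h hmem hin ih =>
    obtain ⟨ihn, ihm⟩ := ih hnd
    refine ⟨ihn, fun c => ?_⟩
    rw [ihm c]
    constructor
    · rintro (hc | ⟨p', hp', hgc, hi⟩)
      · exact Or.inl hc
      · exact Or.inr ⟨p', by omega, hgc, hi⟩
    · rintro (hc | ⟨p', hp', hgc, hi⟩)
      · exact Or.inl hc
      · rcases eq_or_lt_of_le hp' with rfl | hlt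
        · rw [List.getElem?_eq_getElem h] at hgc
          have hc : s[p] = c := Option.some_injective _ hgc
          subst hc
          exact absurd hi hin
        · exact Or.inr ⟨p', by omega, hgc, hi⟩
  | case4 p answer h =>
    refine ⟨hnd, fun c => ?_⟩
    constructor
    · exact Or.inl
    · rintro (hc | ⟨p', hp', hgc, _⟩)
      · exact hc
      · exfalso
        have : s[p']? = none := List.getElem?_eq_none (by omega)
        rw [this] at hgc
        exact Option.some_ne_none c hgc.symm

-- ===== bridge: A's membership condition is Bad =====
lemma exists_inner_iff_bad (s : List Char) (c : Char) :
    (∃ p : Nat, s[p]? = some c ∧ solInner s c (p + 1) p = true) ↔ Bad s c := by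
  constructor
  · rintro ⟨p, hpc, hin⟩
    obtain ⟨r, hqr, hrc, hrp, hno⟩ := (solInner_iff s c (p + 1) p (by omega)).mp hin
    refine ⟨r, by omega, hrc, ?_, ?_⟩
    · exact hno (r - 1) (by omega) (by omega)
    · have hplen : p < s.length := (List.getElem?_eq_some_iff.mp hpc).1
      have : (s.take r)[p]? = some c := by
        rw [List.getElem?_take]
        rw [if_pos (by omega)]
        exact hpc
      exact List.mem_of_getElem? this
  · rintro ⟨i, hi, hic, hip, hmem⟩
    have hilen : i < s.length := (List.getElem?_eq_some_iff.mp hic).1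
    obtain ⟨j, hj, hjc⟩ := List.getElem_of_mem hmem
    have hjlen : j < i := by
      have := hj
      simp only [List.length_take] at this
      omega
    have hjc' : s[j]? = some c := by
      have : (s.take i)[j]? = some c := List.getElem?_eq_getElem hj ▸ congrArg some hjc
      rwa [List.getElem?_take, if_pos hjlen] at this
    set P : Nat → Prop := fun j => s[j]? = some c with hP
    have hPj : P j := hjc'
    set p := Nat.findGreatest P (i - 1) with hp
    have hPp : P p := Nat.findGreatest_spec (m := j) (by omega) hPj
    have hple : p ≤ i - 1 := Nat.findGreatest_le (i - 1)
    have hpne : p ≠ i - 1 := by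
      intro he
      rw [he] at hPp
      exact hip hPp
    have hplt : p < i - 1 := lt_of_le_of_ne hple hpne
    refine ⟨p, hPp, ?_⟩
    rw [solInner_iff s c (p + 1) p (by omega)]
    refine ⟨i, by omega, hic, by omega, ?_⟩
    intro t hqt htr
    have hng := Nat.findGreatest_is_greatest (P := P) (k := t) (n := i - 1) (by omega) (by omega)
    exact hng

-- ===== VERDICT (by name: the statement is the Claim_ definition above) =====
theorem solution_spec : Claim_equal_solution := by
  intro s _hdom
  unfold Spec_solution solution solution_alt
  obtain ⟨hAn, hAm⟩ := solOuter_spec s.toList 0 [] List.nodup_nil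
  have hBbase : ∀ c : Char, c ∈ ([] : List Char) ↔ Bad ([] : List Char) c := by
    intro c
    simp only [List.not_mem_nil, false_iff, Bad]
    rintro ⟨i, _, hgi, _⟩
    simp at hgi
  obtain ⟨hBn0, hBm0⟩ := altLoop_spec s.toList [] [] List.nodup_nil hBbase
  have hBn : List.Nodup (altLoop PySem.Set.empty PySem.Set.empty none s.toList) := hBn0
  have hBm : ∀ c, c ∈ altLoop PySem.Set.empty PySem.Set.empty none s.toList ↔ Bad s.toList c := by
    intro c
    have := hBm0 c
    rwa [List.nil_append] at this
  have hmem : ∀ c, c ∈ solOuter s.toList 0 [] ↔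
      c ∈ altLoop PySem.Set.empty PySem.Set.empty none s.toList := by
    intro c
    rw [hAm c, hBm c]
    simp only [List.not_mem_nil, false_or]
    rw [← exists_inner_iff_bad s.toList c]
    constructor
    · rintro ⟨p, _, hg, hi⟩; exact ⟨p, hg, hi⟩
    · rintro ⟨p, hg, hi⟩; exact ⟨p, Nat.zero_le p, hg, hi⟩
  have hperm : (solOuter s.toList 0 []).Perm
      (altLoop PySem.Set.empty PySem.Set.empty none s.toList) :=
    (List.perm_ext_iff_of_nodup hAn hBn).mpr hmem
  by_cases hLB : altLoop PySem.Set.empty PySem.Set.empty none s.toList = []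
  · have hLA : solOuter s.toList 0 [] = [] := by
      rw [hLB] at hperm
      exact hperm.eq_nil
    have hLB' : altLoop ([] : PySem.Set Char) ([] : PySem.Set Char) none s.toList = [] := hLB
    simp [hLA, hLB']
  · have hLA : solOuter s.toList 0 [] ≠ [] := by
      intro hn
      rw [hn] at hperm
      exact hLB hperm.symm.eq_nil
    rw [if_neg (by simpa [List.length_eq_zero_iff] using hLA), if_pos hLB]
    rw [PySem.List.sorted_eq_sorted_of_perm _ _ (fun x => x) (fun a b h => h) hperm]
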